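/- GENERATED by farm/mkstatement.py from design/units.split.tsv — do not edit.
   THE SPLIT of the proof unit `start_decoder.C7` into `start_decoder.C7a`, `start_decoder.C7b`: the children's statements give the parent's
   UNCHANGED statement (so nothing above the parent — callers, compositions — is touched by the split). -/
import Vorbis.Spec.StartDecoderC7
import Vorbis.Spec.Units.start_decoder_C7
import Vorbis.Spec.Units.start_decoder_C7a
import Vorbis.Spec.Units.start_decoder_C7b
namespace Vorbis.Spec.Splits
open X86 X86.User Asan

/-- The children of the split unit `start_decoder.C7` prove it, by `Vorbis.Spec.StartDecoder.SegC7.of_parts`. -/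
theorem start_decoder_C7
    (h_start_decoder_C7a : Vorbis.Spec.start_decoder_C7a.Statement)
    (h_start_decoder_C7b : Vorbis.Spec.start_decoder_C7b.Statement) :
    Vorbis.Spec.start_decoder_C7.Statement := by
  intro Lay _hLay μ _hμ u₀ _hcode _h_asan_load4_noabort _h_compute_codewords _h_asan_load1_noabort _h_error _h_setup_temp_free
  apply Vorbis.Spec.StartDecoder.SegC7.of_parts
  · exact h_start_decoder_C7a Lay _hLay μ _hμ u₀ _hcode _h_asan_load4_noabort _h_compute_codewords
  · exact h_start_decoder_C7b Lay _hLay μ _hμ u₀ _hcode _h_asan_load1_noabort _h_error _h_setup_temp_free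

end Vorbis.Spec.Splits
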